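-- pv_equiv track=rewrite | github.com/vasilpanchev/Python-Problems | edabit/crack_the_pin_code.py | crack_pincode
-- ===== SOURCE A (Python) =====
-- from typing import List
--
-- def crack_pincode(pincode: str) -> List[str]:
--     adjacency_map = {
--         '0': ['0', '8'],
--         '1': ['1', '2', '4'],
--         '2': ['1', '2', '3', '5'],
--         '3': ['2', '3', '6'],
--         '4': ['1', '4', '5', '7'],
--         '5': ['2', '4', '5', '6', '8'],
--         '6': ['3', '5', '6', '9'],
--         '7': ['4', '7', '8'],
--         '8': ['0', '5', '7', '8', '9'],
--         '9': ['6', '8', '9']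
--     }
--
--     def generate_combinations(possible_digits):
--         if not possible_digits:
--             return ['']
--         current_digits = possible_digits[0]
--         remaining_combinations = generate_combinations(possible_digits[1:])
--         return [digit + combo for digit in current_digits for combo in remaining_combinations]
--
--     possible_digits = [adjacency_map[d] for d in pincode]
--     result = generate_combinations(possible_digits)
--     return result
-- ===== SOURCE B (Python) =====
-- def crack_pincode(pincode):
--     adjacency_map = {
--         '0': '08', '1': '124', '2': '1235', '3': '236', '4': '1457',
--         '5': '24568', '6': '3569', '7': '478', '8': '05789', '9': '689'
--     }
--     choices = [adjacency_map[d] for d in pincode]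
--     total = 1
--     for c in choices:
--         total *= len(c)
--     codes = []
--     for i in range(total):
--         rem = i
--         digits = []
--         for c in reversed(choices):
--             rem, j = divmod(rem, len(c))
--             digits.append(c[j])
--         codes.append(''.join(reversed(digits)))
--     return codes
-- ===== Notes on version B (the rewrite author's own statement) =====
-- stated objective: alternative
-- what changed: Replaced the recursive cartesian-product construction by mixed-radix index decoding: B computes the total count (product of per-digit choice counts) and generates the i-th code for each i in range(total) by repeated divmod, instead of recursively combining suffix lists.
import Mathlib
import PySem

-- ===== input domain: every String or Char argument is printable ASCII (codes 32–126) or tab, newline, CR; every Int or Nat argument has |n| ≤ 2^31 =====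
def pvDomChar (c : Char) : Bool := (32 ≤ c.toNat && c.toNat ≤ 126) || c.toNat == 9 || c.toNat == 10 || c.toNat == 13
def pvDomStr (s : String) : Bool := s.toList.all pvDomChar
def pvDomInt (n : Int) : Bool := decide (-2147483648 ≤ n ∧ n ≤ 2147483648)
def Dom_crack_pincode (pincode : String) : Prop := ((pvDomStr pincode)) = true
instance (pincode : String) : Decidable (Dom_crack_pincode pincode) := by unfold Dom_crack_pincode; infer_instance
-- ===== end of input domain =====

-- B replaces A's recursive cartesian-product construction by mixed-radix index decoding (objective: alternative).

-- ===== PORT A =====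
-- adjacency_map, as an insertion-ordered association dict
def pvAdjMapA : PySem.Dict String (List String) :=
  PySem.Dict.ofList [("0", ["0", "8"]), ("1", ["1", "2", "4"]), ("2", ["1", "2", "3", "5"]),
    ("3", ["2", "3", "6"]), ("4", ["1", "4", "5", "7"]), ("5", ["2", "4", "5", "6", "8"]),
    ("6", ["3", "5", "6", "9"]), ("7", ["4", "7", "8"]), ("8", ["0", "5", "7", "8", "9"]),
    ("9", ["6", "8", "9"])]

-- def generate_combinations(possible_digits): …
def pvGenCombos : List (List String) → List String
  | [] => [""]
  | currentDigits :: rest =>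
      let remaining := pvGenCombos rest
      currentDigits.flatMap (fun digit => remaining.map (fun combo => digit ++ combo))

-- adjacency_map[d] raises KeyError on a non-digit d: those inputs are outside Pre_; the .getD [] is never taken on Pre_
def crack_pincode (pincode : String) : List String :=
  let possibleDigits := pincode.toList.map (fun d => (PySem.Dict.get? pvAdjMapA (String.ofList [d])).getD [])
  pvGenCombos possibleDigits

-- ===== PORT B =====
-- B's adjacency_map has string values ('0' -> '08', …)
def pvAdjMapB : PySem.Dict String String :=
  PySem.Dict.ofList [("0", "08"), ("1", "124"), ("2", "1235"), ("3", "236"), ("4", "1457"),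
    ("5", "24568"), ("6", "3569"), ("7", "478"), ("8", "05789"), ("9", "689")]

-- mixed-radix decoding: total = prod of lens; code i = divmod-decode of i, least-significant (last position) first,
-- digits reversed at the end.  adjacency_map[d] raises KeyError on a non-digit d: outside Pre_, .getD "" never taken on Pre_.
-- c[j] is always in range when the inner loop runs (total > 0 forces len c > 0 and 0 ≤ j < len c), so the .getD ' ' is never taken.
def crack_pincode_alt (pincode : String) : List String :=
  let choices := pincode.toList.map (fun d => (PySem.Dict.get? pvAdjMapB (String.ofList [d])).getD "")
  let total := choices.foldl (fun t c => t * PySem.Str.len c) 1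
  (PySem.List.pyRange 0 total 1).foldl
    (fun codes i =>
      let st := choices.reverse.foldl
        (fun (st : Int × List Char) c =>
          (PySem.Int.floordiv st.1 (PySem.Str.len c),
           st.2 ++ [(PySem.Str.pyGet? c (PySem.Int.mod st.1 (PySem.Str.len c))).getD ' ']))
        (i, [])
      codes ++ [String.ofList st.2.reverse])
    []

-- ===== PRECONDITION & SPEC =====
-- Pre_ excludes pincodes containing a non-digit character, on which Python's adjacency_map[d] raises KeyError
def Pre_crack_pincode (pincode : String) : Prop :=
  pincode.toList.all (fun c => c ∈ ['0','1','2','3','4','5','6','7','8','9']) = true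
instance (pincode : String) : Decidable (Pre_crack_pincode pincode) := by
  unfold Pre_crack_pincode; infer_instance

def pvWitness_crack_pincode : String := "13"

def Spec_crack_pincode (pincode : String) (out : List String) : Prop := out = crack_pincode_alt pincode
instance (pincode : String) (out : List String) : Decidable (Spec_crack_pincode pincode out) := by unfold Spec_crack_pincode; infer_instance

-- ===== CLAIM (what is proved, stated in full; the proofs are below) =====
def Claim_equal_crack_pincode : Prop := ∀ (pincode : String), Dom_crack_pincode pincode → Pre_crack_pincode pincode → Spec_crack_pincode pincode (crack_pincode pincode)

-- ===== LEMMAS AND PROOFS =====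

-- A's per-char lookup / B's per-char lookup
def pvLookA (d : Char) : List String := (PySem.Dict.get? pvAdjMapA (String.ofList [d])).getD []
def pvLookB (d : Char) : String := (PySem.Dict.get? pvAdjMapB (String.ofList [d])).getD ""
-- a string of choices, as the list of its chars viewed as 1-char strings
def pvExpand (s : String) : List String := s.toList.map (fun ch => String.ofList [ch])

-- product of the per-position choice counts
def pvP (ls : List String) : Nat := (ls.map (fun s => s.toList.length)).prod

-- the remainder after decoding positions ls (Nat model of B's inner fold)
def pvRemN : List String → Nat → Nat
  | [], i => i
  | c :: cs, i => pvRemN cs i / c.toList.length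

-- the decoded digits, least-significant-first (Nat model of B's inner fold)
def pvDigN : List String → Nat → List Char
  | [], _ => []
  | c :: cs, i => pvDigN cs i ++ [c.toList.getD (pvRemN cs i % c.toList.length) ' ']

theorem pvLook_digit (d : Char) (h : d ∈ ['0','1','2','3','4','5','6','7','8','9']) :
    pvLookA d = pvExpand (pvLookB d) := by
  fin_cases h <;> decide

theorem pvRemN_eq (ls : List String) (i : Nat) : pvRemN ls i = i / pvP ls := by
  induction ls generalizing i with
  | nil => simp [pvRemN, pvP]
  | cons c cs ih =>
      simp only [pvRemN, pvP, List.map_cons, List.prod_cons, ih]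
      rw [Nat.div_div_eq_div_mul, Nat.mul_comm]

theorem pvDigN_add_mul (ls : List String) (q r : Nat) (h : r < pvP ls) :
    pvDigN ls (q * pvP ls + r) = pvDigN ls r := by
  induction ls generalizing q r with
  | nil => simp [pvDigN]
  | cons c cs ih =>
      have hP : pvP (c :: cs) = c.toList.length * pvP cs := by
        simp [pvP]
      by_cases h0 : pvP cs = 0
      · rw [hP, h0] at h; omega
      have hPpos : 0 < pvP cs := Nat.pos_of_ne_zero h0
      have hr2 : r % pvP cs < pvP cs := Nat.mod_lt _ hPpos
      have hr1 : r / pvP cs < c.toList.length := by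
        rw [Nat.div_lt_iff_lt_mul hPpos, ← hP]
        exact h
      have key : q * pvP (c :: cs) + r
          = (q * c.toList.length + r / pvP cs) * pvP cs + r % pvP cs := by
        rw [hP]
        conv_lhs => rw [← Nat.div_add_mod r (pvP cs)]
        ring
      have hrw : pvDigN cs r = pvDigN cs (r % pvP cs) := by
        conv_lhs => rw [← Nat.div_add_mod r (pvP cs), Nat.mul_comm (pvP cs)]
        exact ih _ _ hr2
      have hdiv : ∀ A m, m < pvP cs → (A * pvP cs + m) / pvP cs = A := by
        intro A m hm
        rw [Nat.add_comm, Nat.add_mul_div_right _ _ hPpos, Nat.div_eq_of_lt hm, Nat.zero_add]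
      rw [show pvDigN (c :: cs) (q * pvP (c :: cs) + r)
            = pvDigN cs (q * pvP (c :: cs) + r)
              ++ [c.toList.getD (pvRemN cs (q * pvP (c :: cs) + r) % c.toList.length) ' '] from rfl,
          show pvDigN (c :: cs) r
            = pvDigN cs r ++ [c.toList.getD (pvRemN cs r % c.toList.length) ' '] from rfl,
          key, ih _ _ hr2, hrw, pvRemN_eq, pvRemN_eq, hdiv _ _ hr2,
          Nat.mul_add_mod_self_right]

-- range-product split (specific form used below)
theorem pv_range_mul_map {β : Type} (a b : Nat) (f : Nat → β) :
    (List.range (a * b)).map f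
      = (List.range a).flatMap (fun q => (List.range b).map (fun r => f (q * b + r))) := by
  induction a with
  | zero => simp
  | succ a ih =>
      rw [Nat.succ_mul, List.range_add, List.map_append, ih, List.range_succ,
          List.flatMap_append]
      simp [List.map_map, Function.comp, Nat.add_comm]

-- index-form of flatMap over a list
theorem pv_flatMap_eq_range {α β : Type} (l : List α) (d : α) (G : α → List β) :
    l.flatMap G = (List.range l.length).flatMap (fun q => G (l.getD q d)) := by
  induction l with
  | nil => simp
  | cons x xs ih =>
      rw [List.flatMap_cons, List.length_cons, List.range_succ_eq_map, List.flatMap_cons,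
          List.flatMap_map]
      simp only [List.getD_cons_zero, List.getD_cons_succ]
      rw [ih]

-- CORE: A's recursive product, applied to expanded choices, is B's mixed-radix enumeration (Nat model)
theorem pv_core (ls : List String) :
    pvGenCombos (ls.map pvExpand)
      = (List.range (pvP ls)).map (fun i => String.ofList (pvDigN ls i).reverse) := by
  induction ls with
  | nil => decide
  | cons c cs ih =>
      have hP : pvP (c :: cs) = c.toList.length * pvP cs := by simp [pvP]
      simp only [List.map_cons, pvGenCombos, ih]
      rw [hP, pv_range_mul_map]
      by_cases h0 : pvP cs = 0
      · simp only [h0, Nat.mul_zero, List.range_zero, List.map_nil,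
          pvExpand, List.flatMap_map]
        rw [List.flatMap_eq_nil_iff.mpr (fun _ _ => rfl)]
        exact (List.flatMap_eq_nil_iff.mpr (fun _ _ => rfl)).symm
      have hPpos : 0 < pvP cs := Nat.pos_of_ne_zero h0
      rw [show pvExpand c = c.toList.map (fun ch => String.ofList [ch]) from rfl, List.flatMap_map,
          pv_flatMap_eq_range c.toList ' ']
      apply List.flatMap_congr
      intro q hq
      rw [List.mem_range] at hq
      rw [List.map_map]
      apply List.map_congr_left
      intro r hr
      rw [List.mem_range] at hr
      simp only [Function.comp]
      rw [show pvDigN (c :: cs) (q * pvP cs + r)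
            = pvDigN cs (q * pvP cs + r)
              ++ [c.toList.getD (pvRemN cs (q * pvP cs + r) % c.toList.length) ' '] from rfl]
      have hQ : (q * pvP cs + r) / pvP cs = q := by
        rw [Nat.add_comm, Nat.add_mul_div_right _ _ hPpos, Nat.div_eq_of_lt hr, Nat.zero_add]
      rw [pvDigN_add_mul cs q r hr, pvRemN_eq, hQ, Nat.mod_eq_of_lt hq,
          List.reverse_append, List.reverse_singleton, String.ofList_append]

-- B's Int-valued inner fold computes the Nat model
theorem pv_fold_int (ls : List String) (i : Nat) :
    ls.reverse.foldl
      (fun (st : Int × List Char) c =>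
        (PySem.Int.floordiv st.1 (PySem.Str.len c),
         st.2 ++ [(PySem.Str.pyGet? c (PySem.Int.mod st.1 (PySem.Str.len c))).getD ' ']))
      ((i : Int), [])
      = ((pvRemN ls i : Int), pvDigN ls i) := by
  induction ls with
  | nil => simp [pvRemN, pvDigN]
  | cons c cs ih =>
      rw [List.reverse_cons, List.foldl_append, ih]
      simp only [List.foldl_cons, List.foldl_nil, pvRemN, pvDigN]
      simp [pysem, List.getD, -Int.natCast_emod, -Int.natCast_mod]

-- B's total fold is the product (Int fold = Nat product)
theorem pv_total (ls : List String) (z : Nat) :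
    ls.foldl (fun t c => t * PySem.Str.len c) (z : Int) = ((z * pvP ls : Nat) : Int) := by
  induction ls generalizing z with
  | nil => simp [pvP]
  | cons c cs ih =>
      rw [List.foldl_cons]
      have h1 : (z : Int) * PySem.Str.len c = ((z * c.toList.length : Nat) : Int) := by
        simp [pysem]
      rw [h1, ih]
      congr 1
      rw [show pvP (c :: cs) = c.toList.length * pvP cs from by simp [pvP]]
      ring

theorem pv_total1 (ls : List String) :
    ls.foldl (fun t c => t * PySem.Str.len c) 1 = ((pvP ls : Nat) : Int) := by
  have := pv_total ls 1
  rw [Nat.one_mul] at this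
  exact_mod_cast this

-- B, rewritten as the Nat-model enumeration
theorem pv_alt_eq (pincode : String) :
    crack_pincode_alt pincode
      = (List.range (pvP (pincode.toList.map pvLookB))).map
          (fun i => String.ofList (pvDigN (pincode.toList.map pvLookB) i).reverse) := by
  simp only [crack_pincode_alt]
  rw [show (pincode.toList.map (fun d => (PySem.Dict.get? pvAdjMapB (String.ofList [d])).getD ""))
        = pincode.toList.map pvLookB from rfl]
  set ls := pincode.toList.map pvLookB with hls
  rw [pv_total1, PySem.List.pyRange_one]
  simp only [sub_zero, Int.toNat_natCast]
  rw [List.foldl_map, PySem.List.foldl_append_singleton_eq_map]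
  rw [List.nil_append]
  apply List.map_congr_left
  intro k hk
  rw [zero_add, pv_fold_int ls k]

theorem crack_pincode_spec : Claim_equal_crack_pincode := by
  intro pincode _ hpre
  unfold Spec_crack_pincode
  rw [pv_alt_eq]
  simp only [crack_pincode]
  unfold Pre_crack_pincode at hpre
  rw [show (pincode.toList.map (fun d => (PySem.Dict.get? pvAdjMapA (String.ofList [d])).getD []))
        = pincode.toList.map pvLookA from rfl]
  have hmap : pincode.toList.map pvLookA = (pincode.toList.map pvLookB).map pvExpand := by
    rw [List.map_map]
    apply List.map_congr_left
    intro d hd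
    rw [List.all_eq_true] at hpre
    have := hpre d hd
    simp only [decide_eq_true_eq] at this
    exact pvLook_digit d this
  rw [hmap, pv_core]
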